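-- pv_equiv track=rewrite | github.com/petercat-ai/whiskerrag_toolkit | tests/whiskerrag_utils/parser/test_heading_context.py | _find_chunk_headings
-- ===== SOURCE A (Python) =====
-- from typing import Dict, List, Tuple, Union
--
-- def _find_chunk_headings(
--
--     chunk_text: str,
--     original_content: str,
--     hierarchy_map: Dict[int, List[str]],
-- ) -> List[str]:
--     """
--     Find the relevant headings for a given chunk based on its position in the original content.
--     Uses binary search for efficient lookup of the closest heading position.
--     """
--     # Find the position of this chunk in the original content
--     chunk_start = original_content.find(chunk_text)
--     if chunk_start == -1:
--         # If exact match not found, try to find the best match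
--         # This can happen due to text processing differences
--         return []
--
--     # Get sorted heading positions for binary search
--     heading_positions = sorted(hierarchy_map.keys())
--
--     if not heading_positions:
--         return []
--
--     # Find the closest heading position that is <= chunk_start
--     # Using binary search for efficiency
--     left, right = 0, len(heading_positions) - 1
--     best_position = -1
--
--     while left <= right:
--         mid = (left + right) // 2
--         if heading_positions[mid] <= chunk_start:
--             best_position = heading_positions[mid]
--             left = mid + 1
--         else:
--             right = mid - 1
--
--     # Return the hierarchy for the best position found
--     if best_position != -1:
--         return hierarchy_map[best_position]
--     else:
--         return []
-- ===== SOURCE B (Python) =====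
-- from typing import Dict, List
--
--
-- def _find_chunk_headings(
--     chunk_text: str,
--     original_content: str,
--     hierarchy_map: Dict[int, List[str]],
-- ) -> List[str]:
--     chunk_start = original_content.find(chunk_text)
--     if chunk_start == -1:
--         return []
--     candidates = [p for p in hierarchy_map if p <= chunk_start]
--     if candidates:
--         return hierarchy_map[max(candidates)]
--     return []
-- ===== Notes on version B (the rewrite author's own statement) =====
-- stated objective: simpler
-- what changed: Replaces sort-then-binary-search (with a -1 sentinel for 'no candidate') by a single linear filter of the keys <= chunk_start followed by max(), looking the winner up directly.
-- intended difference: When the chunk is found and the largest heading position <= chunk_start is the key -1 (with a non-empty heading list stored there), A's -1 'not found' sentinel collides with the genuine key and A returns [], while B returns hierarchy_map[-1], the headings actually at the closest position, which is the intended value. — e.g. on _find_chunk_headings("a", "a", [(-1, ["h"])]): A returns [], B returns ["h"]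
import Mathlib
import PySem

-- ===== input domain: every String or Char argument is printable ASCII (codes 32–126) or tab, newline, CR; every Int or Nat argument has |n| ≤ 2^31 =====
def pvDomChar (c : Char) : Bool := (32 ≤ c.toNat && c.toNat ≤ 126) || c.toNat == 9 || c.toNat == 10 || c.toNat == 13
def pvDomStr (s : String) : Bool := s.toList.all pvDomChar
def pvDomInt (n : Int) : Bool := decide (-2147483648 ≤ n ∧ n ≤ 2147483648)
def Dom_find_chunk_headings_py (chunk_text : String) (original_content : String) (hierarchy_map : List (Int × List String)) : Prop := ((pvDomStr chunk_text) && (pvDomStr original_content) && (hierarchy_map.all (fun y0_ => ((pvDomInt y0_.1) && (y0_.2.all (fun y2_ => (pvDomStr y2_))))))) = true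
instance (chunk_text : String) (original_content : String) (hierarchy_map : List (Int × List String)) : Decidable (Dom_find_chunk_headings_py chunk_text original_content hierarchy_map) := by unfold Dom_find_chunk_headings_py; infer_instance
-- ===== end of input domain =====

-- B replaces A's sort + hand-written binary search (with its -1 'not found' sentinel) by one
-- linear filter of the keys ≤ chunk_start followed by max(); objective: simpler.

-- ===== PORT A =====
-- A's while-loop binary search, transliterated: state (left, right, best_position).
def pvBSearch (ps : List Int) (c : Int) (l r best : Int) : Int :=
  if h : l ≤ r then
    let mid := PySem.Int.floordiv (l + r) 2
    let v := PySem.List.pyGetD ps mid 0   -- heading_positions[mid]; mid always in range here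
    if v ≤ c then pvBSearch ps c (mid + 1) r v
    else pvBSearch ps c l (mid - 1) best
  else best
termination_by (r + 1 - l).toNat
decreasing_by
  · have := PySem.Int.floordiv_two_mid_bounds h; omega
  · have := PySem.Int.floordiv_two_mid_bounds h; omega

def find_chunk_headings_py (chunk_text : String) (original_content : String) (hierarchy_map : List (Int × List String)) : List String :=
  let chunk_start := PySem.Str.find original_content chunk_text
  if chunk_start = -1 then []
  else
    let heading_positions := PySem.List.sorted (hierarchy_map.map (·.1)) (fun x => x) false
    if heading_positions = [] then []
    else
      let best := pvBSearch heading_positions chunk_start 0 ((heading_positions.length : Int) - 1) (-1)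
      if best ≠ -1 then ((hierarchy_map.find? (fun q => q.1 == best)).map (·.2)).getD []
      else []

-- ===== PORT B =====
def find_chunk_headings_py_alt (chunk_text : String) (original_content : String) (hierarchy_map : List (Int × List String)) : List String :=
  let chunk_start := PySem.Str.find original_content chunk_text
  if chunk_start = -1 then []
  else
    let candidates := (hierarchy_map.map (·.1)).filter (fun p => decide (p ≤ chunk_start))
    match PySem.List.max? candidates (fun x => x) with
    | some m => ((hierarchy_map.find? (fun q => q.1 == m)).map (·.2)).getD []
    | none => []

-- ===== PRECONDITION & SPEC =====
-- When the chunk is found and the largest heading position ≤ chunk_start is the genuine key -1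
-- (with a non-empty heading list stored there), A's -1 'not found' sentinel collides with that key
-- and A returns [], while B returns hierarchy_map[-1], the headings at the closest position,
-- which is the intended value.
def D_find_chunk_headings_py (chunk_text : String) (original_content : String) (hierarchy_map : List (Int × List String)) : Prop :=
  0 ≤ PySem.Str.find original_content chunk_text ∧
  (∀ q ∈ hierarchy_map, q.1 ≤ PySem.Str.find original_content chunk_text → q.1 ≤ -1) ∧
  (hierarchy_map.lookup (-1)).getD [] ≠ []
instance (chunk_text : String) (original_content : String) (hierarchy_map : List (Int × List String)) : Decidable (D_find_chunk_headings_py chunk_text original_content hierarchy_map) := by unfold D_find_chunk_headings_py; infer_instance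

def Spec_find_chunk_headings_py (chunk_text : String) (original_content : String) (hierarchy_map : List (Int × List String)) (out : List String) : Prop := ¬ D_find_chunk_headings_py chunk_text original_content hierarchy_map → out = find_chunk_headings_py_alt chunk_text original_content hierarchy_map
instance (chunk_text : String) (original_content : String) (hierarchy_map : List (Int × List String)) (out : List String) : Decidable (Spec_find_chunk_headings_py chunk_text original_content hierarchy_map out) := by unfold Spec_find_chunk_headings_py; infer_instance

def pvDiffWitness_find_chunk_headings_py : String × String × (List (Int × List String)) := ("a", "a", [(-1, ["h"])])
def pvDiffWitnessOut_find_chunk_headings_py : (List String) × (List String) := ([], ["h"])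

-- ===== CLAIM (what is proved, stated in full; the proofs are below) =====
def Claim_unchanged_find_chunk_headings_py : Prop := ∀ (chunk_text : String) (original_content : String) (hierarchy_map : List (Int × List String)), Dom_find_chunk_headings_py chunk_text original_content hierarchy_map → Spec_find_chunk_headings_py chunk_text original_content hierarchy_map (find_chunk_headings_py chunk_text original_content hierarchy_map)
def Claim_changed_find_chunk_headings_py : Prop := Dom_find_chunk_headings_py (pvDiffWitness_find_chunk_headings_py.1) (pvDiffWitness_find_chunk_headings_py.2.1) (pvDiffWitness_find_chunk_headings_py.2.2) ∧ D_find_chunk_headings_py (pvDiffWitness_find_chunk_headings_py.1) (pvDiffWitness_find_chunk_headings_py.2.1) (pvDiffWitness_find_chunk_headings_py.2.2) ∧ find_chunk_headings_py (pvDiffWitness_find_chunk_headings_py.1) (pvDiffWitness_find_chunk_headings_py.2.1) (pvDiffWitness_find_chunk_headings_py.2.2) = pvDiffWitnessOut_find_chunk_headings_py.1 ∧ find_chunk_headings_py_alt (pvDiffWitness_find_chunk_headings_py.1) (pvDiffWitness_find_chunk_headings_py.2.1) (pvDiffWitness_find_chunk_headings_py.2.2) = pvDiffWitnessOut_find_chunk_headings_py.2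 ∧ pvDiffWitnessOut_find_chunk_headings_py.1 ≠ pvDiffWitnessOut_find_chunk_headings_py.2
def Claim_exact_find_chunk_headings_py : Prop := ∀ (chunk_text : String) (original_content : String) (hierarchy_map : List (Int × List String)), Dom_find_chunk_headings_py chunk_text original_content hierarchy_map → D_find_chunk_headings_py chunk_text original_content hierarchy_map → find_chunk_headings_py chunk_text original_content hierarchy_map ≠ find_chunk_headings_py_alt chunk_text original_content hierarchy_map

-- ===== LEMMAS AND PROOFS =====

-- first-match dict lookup: List.lookup is find? projected to the value
lemma pvLookup_eq_map_find? (l : List (Int × List String)) (k : Int) :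
    l.lookup k = (l.find? (fun q => q.1 == k)).map (·.2) := by
  induction l with
  | nil => rfl
  | cons h t ih =>
    rcases h with ⟨a, b⟩
    by_cases hk : a = k
    · simp [List.lookup, List.find?, hk]
    · have h1 : (k == a) = false := by simp [Ne.symm hk]
      have h2 : (a == k) = false := by simp [hk]
      simp [List.lookup, List.find?, h1, h2, ih]

-- The binary-search loop on a sorted list: with the standard invariants it returns the largest
-- element ≤ c, or -1 when no element is ≤ c.
lemma pvBSearch_char (ps : List Int) (c : Int) (hps : ps.Pairwise (· ≤ ·)) :
    ∀ (fuel : Nat) (l r best : Int),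
    (r + 1 - l).toNat ≤ fuel →
    0 ≤ l → r ≤ (ps.length : Int) - 1 → l ≤ r + 1 →
    (∀ i : Nat, (hi : i < ps.length) → (i : Int) < l → ps[i] ≤ c) →
    (∀ i : Nat, (hi : i < ps.length) → r < (i : Int) → c < ps[i]) →
    ((best = -1 ∧ l = 0) ∨ (best ∈ ps ∧ best ≤ c ∧ ∀ i : Nat, (hi : i < ps.length) → (i : Int) < l → ps[i] ≤ best)) →
    (pvBSearch ps c l r best = -1 ∧ ∀ p ∈ ps, c < p) ∨
    (pvBSearch ps c l r best ∈ ps ∧ pvBSearch ps c l r best ≤ c ∧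
      ∀ p ∈ ps, p ≤ c → p ≤ pvBSearch ps c l r best) := by
  have hmono : ∀ i j : Nat, (hi : i < ps.length) → (hj : j < ps.length) → i ≤ j → ps[i] ≤ ps[j] := by
    intro i j hi hj hij
    rcases Nat.lt_or_eq_of_le hij with h | h
    · exact (List.pairwise_iff_getElem.mp hps) i j hi hj h
    · subst h; exact le_refl _
  intro fuel
  induction fuel with
  | zero =>
    intro l r best hf h0 hr hlr hleft hright hbest
    have hnl : ¬ l ≤ r := by omega
    rw [pvBSearch, dif_neg hnl]
    rcases hbest with ⟨hb, hl0⟩ | ⟨hmem, hbc, hmax⟩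
    · left
      refine ⟨hb, ?_⟩
      intro p hp
      obtain ⟨i, hi, hpi⟩ := List.mem_iff_getElem.mp hp
      exact hpi ▸ hright i hi (by omega)
    · right
      refine ⟨hmem, hbc, ?_⟩
      intro p hp hpc
      obtain ⟨i, hi, hpi⟩ := List.mem_iff_getElem.mp hp
      by_cases hil : (i : Int) < l
      · exact hpi ▸ hmax i hi hil
      · exact absurd (hpi ▸ hright i hi (by omega)) (by omega)
  | succ fuel ih =>
    intro l r best hf h0 hr hlr hleft hright hbest
    by_cases hcase : l ≤ r
    · have hmb := PySem.Int.floordiv_two_mid_bounds hcase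
      set mid := PySem.Int.floordiv (l + r) 2 with hmid
      have hm0 : 0 ≤ mid := by omega
      have hmlt : mid < (ps.length : Int) := by omega
      have hv : PySem.List.pyGetD ps mid 0 = ps[mid.toNat]'(by omega) :=
        PySem.List.pyGetD_eq_getElem ps 0 hm0 hmlt
      by_cases hvc : ps[mid.toNat]'(by omega) ≤ c
      · have hstep : pvBSearch ps c l r best = pvBSearch ps c (mid + 1) r (ps[mid.toNat]'(by omega)) := by
          rw [pvBSearch, dif_pos hcase]
          simp only [← hmid, hv, if_pos hvc]
        rw [hstep]
        refine ih (mid + 1) r (ps[mid.toNat]'(by omega)) (by omega) (by omega) hr (by omega) ?_ hright ?_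
        · intro i hi hil
          calc ps[i] ≤ ps[mid.toNat]'(by omega) := hmono i mid.toNat hi (by omega) (by omega)
            _ ≤ c := hvc
        · right
          exact ⟨List.getElem_mem _, hvc, fun i hi hil => hmono i mid.toNat hi (by omega) (by omega)⟩
      · have hstep : pvBSearch ps c l r best = pvBSearch ps c l (mid - 1) best := by
          rw [pvBSearch, dif_pos hcase]
          simp only [← hmid, hv, if_neg hvc]
        rw [hstep]
        refine ih l (mid - 1) best (by omega) h0 (by omega) (by omega) hleft ?_ hbest
        intro i hi hil
        by_cases hir : r < (i : Int)
        · exact hright i hi hir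
        · calc c < ps[mid.toNat]'(by omega) := by omega
            _ ≤ ps[i] := hmono mid.toNat i (by omega) hi (by omega)
    · have hnl : ¬ l ≤ r := hcase
      rw [pvBSearch, dif_neg hnl]
      rcases hbest with ⟨hb, hl0⟩ | ⟨hmem, hbc, hmax⟩
      · left
        refine ⟨hb, ?_⟩
        intro p hp
        obtain ⟨i, hi, hpi⟩ := List.mem_iff_getElem.mp hp
        exact hpi ▸ hright i hi (by omega)
      · right
        refine ⟨hmem, hbc, ?_⟩
        intro p hp hpc
        obtain ⟨i, hi, hpi⟩ := List.mem_iff_getElem.mp hp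
        by_cases hil : (i : Int) < l
        · exact hpi ▸ hmax i hi hil
        · exact absurd (hpi ▸ hright i hi (by omega)) (by omega)

-- The initial call of A's loop.
lemma pvBSearch_main (ps : List Int) (c : Int) (hps : ps.Pairwise (· ≤ ·)) :
    (pvBSearch ps c 0 ((ps.length : Int) - 1) (-1) = -1 ∧ ∀ p ∈ ps, c < p) ∨
    (pvBSearch ps c 0 ((ps.length : Int) - 1) (-1) ∈ ps ∧
      pvBSearch ps c 0 ((ps.length : Int) - 1) (-1) ≤ c ∧
      ∀ p ∈ ps, p ≤ c → p ≤ pvBSearch ps c 0 ((ps.length : Int) - 1) (-1)) := by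
  refine pvBSearch_char ps c hps ((ps.length : Int) - 1 + 1 - 0).toNat 0 _ (-1) le_rfl
    le_rfl le_rfl (by omega) ?_ ?_ (Or.inl ⟨rfl, rfl⟩)
  · intro i hi h; omega
  · intro i hi h; omega

theorem find_chunk_headings_py_spec : Claim_unchanged_find_chunk_headings_py := by
  intro ct oc hm _dom hnd
  unfold find_chunk_headings_py find_chunk_headings_py_alt
  by_cases h1 : PySem.Str.find oc ct = -1
  · simp only [h1, if_true]
  · have hc0 : 0 ≤ PySem.Str.find oc ct := by
      have := PySem.Chars.neg_one_le_find oc.toList ct.toList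
      rw [PySem.Str.find_eq]; rw [PySem.Str.find_eq] at h1; omega
    simp only [if_neg h1]
    set c := PySem.Str.find oc ct with hc
    set keys := hm.map (·.1) with hkeys
    set ps := PySem.List.sorted keys (fun x => x) false with hps
    have hpair : ps.Pairwise (· ≤ ·) := PySem.List.sorted_pairwise keys (fun x => x)
    have hmem : ∀ p, p ∈ ps ↔ p ∈ keys := fun p => PySem.List.mem_sorted keys (fun x => x) false p
    set cands := keys.filter (fun p => decide (p ≤ c)) with hcands
    cases hmax : PySem.List.max? cands (fun x => x) with
    | none =>
      have hcnil : cands = [] := (PySem.List.max?_eq_none_iff cands (fun x => x)).mp hmax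
      have hno : ∀ p ∈ keys, ¬ p ≤ c := by
        intro p hp hpc
        have : p ∈ cands := List.mem_filter.mpr ⟨hp, by simpa using hpc⟩
        simp [hcnil] at this
      by_cases hpsnil : ps = []
      · simp [hpsnil]
      · rcases pvBSearch_main ps c hpair with ⟨he, _⟩ | ⟨hmem', hle, _⟩
        · simp only [if_neg hpsnil, he, ne_eq, not_true_eq_false, if_false]
        · exact absurd hle (hno _ ((hmem _).mp hmem'))
    | some m =>
      have hmmem : m ∈ cands := PySem.List.max?_mem hmax
      have hmkeys : m ∈ keys := (List.mem_filter.mp hmmem).1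
      have hmc : m ≤ c := by have := (List.mem_filter.mp hmmem).2; simpa using this
      have hismax : ∀ y ∈ cands, y ≤ m := PySem.List.max?_isMax hmax
      have hpsnil : ps ≠ [] := by
        intro h
        rw [hps, PySem.List.sorted_eq_nil_iff] at h
        rw [h] at hmkeys; exact absurd hmkeys (List.not_mem_nil)
      rcases pvBSearch_main ps c hpair with ⟨he, hall⟩ | ⟨hrmem, hrc, hrmax⟩
      · exact absurd hmc (not_le.mpr (hall m ((hmem m).mpr hmkeys)))
      · set b := pvBSearch ps c 0 ((ps.length : Int) - 1) (-1) with hb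
        have hbm : b = m := by
          refine le_antisymm ?_ (hrmax m ((hmem m).mpr hmkeys) hmc)
          exact hismax b (List.mem_filter.mpr ⟨(hmem b).mp hrmem, by simpa using hrc⟩)
        by_cases hbne : b = -1
        · have hm1 : m = -1 := by omega
          have hsome : (hm.find? (fun q => q.1 == (-1 : Int))).isSome := by
            rw [List.find?_isSome]
            obtain ⟨q, hqmem, hq1⟩ := List.mem_map.mp (hm1 ▸ hmkeys)
            exact ⟨q, hqmem, by simpa using hq1⟩
          obtain ⟨q, hq⟩ := Option.isSome_iff_exists.mp hsome
          by_cases hqe : q.2 = []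
          · simp only [if_neg hpsnil, hbne, ne_eq, not_true_eq_false, if_false, hm1, hq,
              Option.map_some, Option.getD_some, hqe]
          · exfalso
            apply hnd
            refine ⟨hc0, ?_, ?_⟩
            · intro p hp hpc
              have : p.1 ≤ b := hrmax p.1 ((hmem p.1).mpr (List.mem_map.mpr ⟨p, hp, rfl⟩)) hpc
              omega
            · rw [pvLookup_eq_map_find?, hq]; simpa using hqe
        · have hmne : m ≠ -1 := by omega
          simp only [if_neg hpsnil, hbm, if_pos hmne]

theorem find_chunk_headings_py_changed : Claim_changed_find_chunk_headings_py := by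
  unfold Claim_changed_find_chunk_headings_py
  refine ⟨by decide, by decide, ?_, by decide, by decide⟩
  show find_chunk_headings_py "a" "a" [(-1, ["h"])] = []
  have hbs : pvBSearch [-1] 0 0 0 (-1) = -1 := by
    rw [pvBSearch]; norm_num [PySem.Int.floordiv, PySem.List.pyGetD]
    rw [pvBSearch]; norm_num
  have h1 : PySem.Str.find "a" "a" = 0 := by decide
  have h2 : PySem.List.sorted ([((-1 : Int), ["h"])].map (·.1)) (fun x => x) false = [-1] := by decide
  simp only [find_chunk_headings_py, h1, h2]
  norm_num [hbs]

theorem find_chunk_headings_py_tight : Claim_exact_find_chunk_headings_py := by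
  intro ct oc hm _dom hD
  obtain ⟨hc0, hno, hfind⟩ := hD
  set c := PySem.Str.find oc ct with hc
  have h1 : ¬ c = -1 := by omega
  cases hq : hm.find? (fun q => q.1 == (-1 : Int)) with
  | none => rw [pvLookup_eq_map_find?, hq] at hfind; simp at hfind
  | some q =>
  have hq2 : q.2 ≠ [] := by
    rw [pvLookup_eq_map_find?, hq] at hfind; simpa using hfind
  have hnoK : ∀ p ∈ hm.map (·.1), p ≤ c → p ≤ -1 := by
    intro p hp hpc
    obtain ⟨q', hq', rfl⟩ := List.mem_map.mp hp
    exact hno q' hq' hpc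
  have hqmem : q ∈ hm := List.mem_of_find?_eq_some hq
  have hq1 : q.1 = -1 := by have := List.find?_some hq; simpa using this
  set keys := hm.map (·.1) with hkeys
  have hm1keys : (-1 : Int) ∈ keys := List.mem_map.mpr ⟨q, hqmem, hq1⟩
  set ps := PySem.List.sorted keys (fun x => x) false with hps
  have hpair : ps.Pairwise (· ≤ ·) := PySem.List.sorted_pairwise keys (fun x => x)
  have hmem : ∀ p, p ∈ ps ↔ p ∈ keys := fun p => PySem.List.mem_sorted keys (fun x => x) false p
  have hpsnil : ps ≠ [] := by
    intro h
    rw [hps, PySem.List.sorted_eq_nil_iff] at h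
    rw [h] at hm1keys; exact absurd hm1keys (List.not_mem_nil)
  set cands := keys.filter (fun p => decide (p ≤ c)) with hcands
  have hm1cands : (-1 : Int) ∈ cands := List.mem_filter.mpr ⟨hm1keys, by simp; omega⟩
  -- B's value is q.2, which is non-empty
  have hBval : find_chunk_headings_py_alt ct oc hm = q.2 := by
    unfold find_chunk_headings_py_alt
    simp only [← hc, if_neg h1, ← hkeys, ← hcands]
    cases hmax : PySem.List.max? cands (fun x => x) with
    | none =>
      have := (PySem.List.max?_eq_none_iff cands (fun x => x)).mp hmax
      rw [this] at hm1cands; exact absurd hm1cands (List.not_mem_nil)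
    | some m =>
      have hmmem : m ∈ cands := PySem.List.max?_mem hmax
      have hmkeys : m ∈ keys := (List.mem_filter.mp hmmem).1
      have hmc : m ≤ c := by have := (List.mem_filter.mp hmmem).2; simpa using this
      have hm1 : m = -1 := by
        have hub : m ≤ -1 := hnoK m hmkeys hmc
        have hlb : -1 ≤ m := PySem.List.max?_isMax hmax (-1) hm1cands
        omega
      simp only [hm1, hq, Option.map_some, Option.getD_some]
  -- A's value is []
  have hAval : find_chunk_headings_py ct oc hm = [] := by
    unfold find_chunk_headings_py
    simp only [← hc, if_neg h1, ← hkeys, ← hps, if_neg hpsnil]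
    rcases pvBSearch_main ps c hpair with ⟨he, _⟩ | ⟨hrmem, hrc, hrmax⟩
    · simp only [he, ne_eq, not_true_eq_false, if_false]
    · have hb1 : pvBSearch ps c 0 ((ps.length : Int) - 1) (-1) = -1 := by
        have hub : pvBSearch ps c 0 ((ps.length : Int) - 1) (-1) ≤ -1 :=
          hnoK _ ((hmem _).mp hrmem) hrc
        have hlb : -1 ≤ pvBSearch ps c 0 ((ps.length : Int) - 1) (-1) :=
          hrmax (-1) ((hmem _).mpr hm1keys) (by omega)
        omega
      simp only [hb1, ne_eq, not_true_eq_false, if_false]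
  rw [hAval, hBval]
  exact fun h => hq2 h.symm
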